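-- pv_equiv track=rewrite | github.com/Jlubs3/Performance-Lab | task1/script1_3.py | circular_array_path
-- ===== SOURCE A (Python) =====
-- def circular_array_path(n, m):
--     result = []
--     current_index = 0
--     for _ in range(n):
--         result.append(current_index + 1)
--         current_index = (current_index - 1 + m) % n
--         if current_index == 0:
--             break
--     return result
-- ===== SOURCE B (Python) =====
-- def circular_array_path(n, m):
--     # Closed form: the visited indices are the arithmetic progression i*(m-1) mod n,
--     # and the walk stops after n // gcd(n, (m-1) % n) steps (when index 0 recurs).
--     if n <= 0:
--         return []
--     step = (m - 1) % n
--     a, b = n, step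
--     while b:
--         a, b = b, a % b
--     length = n // a
--     return [(i * step) % n + 1 for i in range(length)]
-- ===== Notes on version B (the rewrite author's own statement) =====
-- stated objective: alternative
-- what changed: Replaces the stateful simulation of the circular walk (running index, append, break-on-zero) by a closed form: the emitted count is computed up front as n // gcd(n, (m-1) % n) and the entries are generated directly as the arithmetic progression (i*step) % n + 1 with no accumulator or break check.
import Mathlib
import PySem

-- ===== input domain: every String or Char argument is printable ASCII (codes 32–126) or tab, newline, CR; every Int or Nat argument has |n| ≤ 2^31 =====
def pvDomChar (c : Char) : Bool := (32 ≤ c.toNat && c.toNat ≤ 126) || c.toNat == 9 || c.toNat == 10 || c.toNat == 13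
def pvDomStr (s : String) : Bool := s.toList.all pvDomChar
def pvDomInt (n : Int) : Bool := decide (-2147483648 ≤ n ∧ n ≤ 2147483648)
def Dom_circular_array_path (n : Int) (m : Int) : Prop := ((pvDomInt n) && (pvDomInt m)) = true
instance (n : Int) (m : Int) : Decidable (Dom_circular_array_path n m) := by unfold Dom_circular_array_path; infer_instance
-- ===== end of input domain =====

-- B replaces the stateful walk (running index, append, break-on-zero) by a closed form:
-- the emitted count is n // gcd(n, (m-1) % n) and the entries are (i*step) % n + 1 directly.

-- ===== PORT A =====
-- the for-loop over range(n) with early break: fuel = n.toNat, state = (current_index, result)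
def pvALoop (n m : Int) : Nat → Int → List Int → List Int
  | 0, _, acc => acc
  | f + 1, cur, acc =>
    let acc' := acc ++ [cur + 1]
    let cur' := PySem.Int.mod (cur - 1 + m) n
    if cur' = 0 then acc' else pvALoop n m f cur' acc'

def circular_array_path (n : Int) (m : Int) : List Int :=
  pvALoop n m n.toNat 0 []

-- ===== PORT B =====
-- termination fact for the hand-written Euclid loop of Source B (Python % : sign of the divisor)
theorem pvModAbsLt (a b : Int) (hb : b ≠ 0) : (PySem.Int.mod a b).natAbs < b.natAbs := by
  rcases lt_or_gt_of_ne hb with h | h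
  · have := PySem.Int.mod_neg_bounds a h
    omega
  · have h1 := PySem.Int.mod_nonneg a h
    have h2 := PySem.Int.mod_lt a h
    omega

-- port of Source B's `while b: a, b = b, a % b`
def pvEuclid (a b : Int) : Int :=
  if b = 0 then a else pvEuclid b (PySem.Int.mod a b)
termination_by b.natAbs
decreasing_by exact pvModAbsLt a b (by assumption)

def circular_array_path_alt (n : Int) (m : Int) : List Int :=
  if n ≤ 0 then []
  else
    let step := PySem.Int.mod (m - 1) n
    let g := pvEuclid n step
    let length := PySem.Int.floordiv n g
    (PySem.List.pyRange 0 length 1).map (fun i => PySem.Int.mod (i * step) n + 1)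

-- ===== PRECONDITION & SPEC =====
def Spec_circular_array_path (n : Int) (m : Int) (out : List Int) : Prop := out = circular_array_path_alt n m
instance (n : Int) (m : Int) (out : List Int) : Decidable (Spec_circular_array_path n m out) := by unfold Spec_circular_array_path; infer_instance

-- ===== CLAIM (what is proved, stated in full; the proofs are below) =====
def Claim_equal_circular_array_path : Prop := ∀ (n : Int) (m : Int), Dom_circular_array_path n m → Spec_circular_array_path n m (circular_array_path n m)

-- ===== LEMMAS AND PROOFS =====

-- the Euclid loop computes the gcd (both arguments nonnegative in Source B's use)
theorem pvEuclid_eq (b a : Nat) : pvEuclid (a : Int) (b : Int) = (Nat.gcd a b : Int) := by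
  induction b using Nat.strong_induction_on generalizing a with
  | _ b ih =>
    rw [pvEuclid]
    by_cases hb : (b : Int) = 0
    · have : b = 0 := by exact_mod_cast hb
      subst this; simp
    · have hbpos : (0 : Int) < b := by positivity
      have hb0 : b ≠ 0 := by exact_mod_cast hb
      rw [if_neg hb, PySem.Int.mod_eq_emod_of_pos hbpos, ← Int.natCast_emod,
        ih (a % b) (Nat.mod_lt _ (Nat.pos_of_ne_zero hb0)) b]
      rw [Nat.gcd_comm b (a % b), ← Nat.gcd_rec b a, Nat.gcd_comm]

-- (k*D) % N = 0  iff  the cycle length N / gcd N D divides k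
theorem pv_period (N D k : Nat) (hN : 0 < N) :
    (k * D) % N = 0 ↔ (N / Nat.gcd N D) ∣ k := by
  have hgpos : 0 < Nat.gcd N D := Nat.gcd_pos_of_pos_left _ hN
  have hgN : Nat.gcd N D ∣ N := Nat.gcd_dvd_left _ _
  have hgD : Nat.gcd N D ∣ D := Nat.gcd_dvd_right _ _
  have hco : Nat.Coprime (N / Nat.gcd N D) (D / Nat.gcd N D) :=
    Nat.coprime_div_gcd_div_gcd hgpos
  rw [← Nat.dvd_iff_mod_eq_zero]
  have e1 : N / Nat.gcd N D * Nat.gcd N D = N := Nat.div_mul_cancel hgN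
  constructor
  · intro h
    have h2 : (N / Nat.gcd N D) * Nat.gcd N D ∣ (k * (D / Nat.gcd N D)) * Nat.gcd N D := by
      rw [e1, mul_assoc, Nat.div_mul_cancel hgD]; exact h
    exact hco.dvd_of_dvd_mul_right ((Nat.mul_dvd_mul_iff_right hgpos).mp h2)
  · intro h
    obtain ⟨c, hc⟩ := h
    have h1 : N ∣ k * Nat.gcd N D := by
      refine ⟨c, ?_⟩
      rw [hc]
      conv_rhs => rw [← e1]
      ring
    exact h1.trans (Nat.mul_dvd_mul_left k hgD)

-- loop invariant: starting at step i < L with index (i*D)%N, the loop emits exactly steps i..L-1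
theorem pvALoop_spec (n m : Int) (N D L : Nat) (hn : 0 < n)
    (hN : (N : Int) = n) (hD : (D : Int) = PySem.Int.mod (m - 1) n)
    (hL0 : (L * D) % N = 0)
    (hmin : ∀ j, 0 < j → j < L → (j * D) % N ≠ 0) :
    ∀ (f i : Nat) (acc : List Int), i + f = N → i < L → L ≤ N →
      pvALoop n m f (((i * D) % N : Nat) : Int) acc
        = acc ++ (List.range (L - i)).map (fun k => ((((i + k) * D) % N : Nat) : Int) + 1) := by
  intro f
  induction f with
  | zero => intro i acc h1 h2 h3; omega
  | succ f ih =>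
    intro i acc h1 h2 h3
    rw [pvALoop]
    have hDlt : ((D : Int)) % n = (D : Int) := by
      rw [hD, PySem.Int.mod_eq_emod_of_pos hn, Int.emod_emod_of_dvd _ dvd_rfl]
    have hcur : PySem.Int.mod ((((i * D) % N : Nat) : Int) - 1 + m) n
        = ((((i + 1) * D) % N : Nat) : Int) := by
      rw [PySem.Int.mod_eq_emod_of_pos hn]
      have e1 : ((((i * D) % N : Nat) : Int) - 1 + m) % n = (((i * D : Nat) : Int) + (m - 1)) % n := by
        rw [Int.natCast_emod, hN]
        conv_lhs => rw [show ((i * D : Nat) : Int) % n - 1 + m = ((i * D : Nat) : Int) % n + (m - 1) from by ring]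
        rw [Int.emod_add_emod]
      rw [e1, Int.natCast_emod, hN]
      have hDm : (m - 1) % n = (D : Int) := by
        rw [hD, PySem.Int.mod_eq_emod_of_pos hn]
      have e2 : (((i * D : Nat) : Int) + (m - 1)) % n = (((i * D : Nat) : Int) + (D : Int)) % n := by
        rw [← Int.add_emod_emod, hDm]
      rw [e2]
      congr 1
      push_cast
      ring
    rw [hcur]
    by_cases hz : ((((i + 1) * D) % N : Nat) : Int) = 0
    · rw [if_pos hz]
      have hz' : ((i + 1) * D) % N = 0 := by exact_mod_cast hz
      have hiL : i + 1 = L := by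
        by_contra hne
        exact hmin (i + 1) (by omega) (by omega) hz'
      rw [show L - i = 1 from by omega]
      simp
    · rw [if_neg hz]
      have hz' : ((i + 1) * D) % N ≠ 0 := fun h => hz (by exact_mod_cast h)
      have hiL : i + 1 < L := by
        rcases Nat.lt_or_ge (i + 1) L with h | h
        · exact h
        · exfalso; apply hz'; rw [show i + 1 = L from by omega]; exact hL0
      rw [ih (i + 1) (acc ++ [(((i * D) % N : Nat) : Int) + 1]) (by omega) hiL h3]
      rw [show L - i = (L - (i + 1)) + 1 from by omega, List.range_succ_eq_map]
      simp only [List.map_cons, List.map_map, List.append_assoc, List.cons_append,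
        List.nil_append, Nat.add_zero]
      congr 2
      apply List.map_congr_left
      intro k _
      simp only [Function.comp_apply]
      have e : i + 1 + k = i + k.succ := by omega
      rw [e]

-- ===== VERDICT (by name: the statement is the Claim_ definition above) =====
theorem circular_array_path_spec : Claim_equal_circular_array_path := by
  intro n m _
  unfold Spec_circular_array_path circular_array_path circular_array_path_alt
  by_cases hn : n ≤ 0
  · rw [if_pos hn]
    have : n.toNat = 0 := by omega
    rw [this, pvALoop]
  · simp only [if_neg hn]
    have hnpos : 0 < n := by omega
    set N := n.toNat with hNdef
    have hN : (N : Int) = n := by omega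
    set D := (PySem.Int.mod (m - 1) n).toNat with hDdef
    have hD : (D : Int) = PySem.Int.mod (m - 1) n := by
      have := PySem.Int.mod_nonneg (m - 1) hnpos
      omega
    have hNpos : 0 < N := by omega
    have hgpos : 0 < Nat.gcd N D := Nat.gcd_pos_of_pos_left _ hNpos
    set L := N / Nat.gcd N D with hLdef
    have hLpos : 0 < L := Nat.div_pos (Nat.gcd_le_left _ hNpos) hgpos
    have hLN : L ≤ N := Nat.div_le_self _ _
    have hL0 : (L * D) % N = 0 := (pv_period N D L hNpos).mpr dvd_rfl
    have hmin : ∀ j, 0 < j → j < L → (j * D) % N ≠ 0 := by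
      intro j hj hjL h
      have hdvd := (pv_period N D j hNpos).mp h
      have := Nat.le_of_dvd hj hdvd
      omega
    have hA := pvALoop_spec n m N D L hnpos hN hD hL0 hmin N 0 [] (by omega) hLpos hLN
    simp only [Nat.zero_mul, Nat.zero_mod, Nat.cast_zero, Nat.zero_add, List.nil_append,
      Nat.sub_zero] at hA
    rw [hA]
    -- B side: the gcd, the length and the range
    have hg : pvEuclid n (PySem.Int.mod (m - 1) n) = (Nat.gcd N D : Int) := by
      rw [← hD, ← hN]; exact pvEuclid_eq D N
    rw [hg]
    have hlen : PySem.Int.floordiv n (Nat.gcd N D : Int) = (L : Int) := by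
      rw [← hN, PySem.Int.floordiv_natCast]
    rw [hlen, PySem.List.pyRange_zero_natCast, List.map_map]
    apply List.map_congr_left
    intro k _
    simp only [Function.comp_apply]
    rw [← hD, PySem.Int.mod_eq_emod_of_pos hnpos, Int.natCast_emod, Nat.cast_mul, hN]
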